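-- pv_equiv track=rewrite | github.com/thdb-theo/Board-Games | Battleships.py | reverse_str
-- ===== SOURCE A (Python) =====
-- def reverse_str(s):
--     if not isinstance(s, str):
--         return s
--     strs, nums = '', ''
--     for i in s:
--         if i.isdigit():
--             nums += i
--         else:
--             strs += i
--     if s[0].isdigit():
--         return strs + nums
--     else:
--         return nums + strs
-- ===== SOURCE B (Python) =====
-- def reverse_str(s):
--     if not isinstance(s, str):
--         return s
--     first_is_digit = s[0].isdigit()
--     return ''.join(sorted(s, key=lambda c: c.isdigit() == first_is_digit))
-- ===== Notes on version B (the rewrite author's own statement) =====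
-- stated objective: idiomatic
-- what changed: Replaces the two-accumulator partition loop and branch on s[0] with one stable sort of the characters keyed by whether their digit-ness matches the first character's, so the matching group lands last and each group keeps its order.
import Mathlib
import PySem

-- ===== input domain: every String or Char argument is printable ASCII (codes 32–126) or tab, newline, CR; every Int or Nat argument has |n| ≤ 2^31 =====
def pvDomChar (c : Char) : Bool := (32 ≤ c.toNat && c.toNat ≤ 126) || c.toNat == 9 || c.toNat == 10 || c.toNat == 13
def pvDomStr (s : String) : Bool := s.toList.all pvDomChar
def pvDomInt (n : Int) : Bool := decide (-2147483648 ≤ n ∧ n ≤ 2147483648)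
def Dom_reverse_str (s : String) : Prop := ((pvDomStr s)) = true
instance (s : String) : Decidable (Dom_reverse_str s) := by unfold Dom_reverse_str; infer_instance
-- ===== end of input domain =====

-- B reorders the string with one stable sort keyed on matching the first character's digit-ness,
-- instead of A's two-accumulator partition loop followed by a branch on s[0] (objective: idiomatic).


-- ===== PORT A =====
-- literal port of A: partition loop into (strs, nums), then branch on s[0].isdigit()
def reverse_str (s : String) : String :=
  let p := s.toList.foldl
    (fun (p : List Char × List Char) i =>
      if PySem.Chars.isdigit i then (p.1, p.2 ++ [i]) else (p.1 ++ [i], p.2))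
    ([], [])
  match PySem.List.pyGet? s.toList 0 with
  | none => ""        -- s[0] raises IndexError on the empty string; excluded by Pre_
  | some c => if PySem.Chars.isdigit c then String.ofList (p.1 ++ p.2) else String.ofList (p.2 ++ p.1)

-- ===== PORT B =====
-- literal port of B: stable sort keyed by (c.isdigit() == first_is_digit); Python's bool key False<True ported as Nat 0/1
def reverse_str_alt (s : String) : String :=
  match PySem.List.pyGet? s.toList 0 with
  | none => ""        -- s[0] raises IndexError on the empty string; excluded by Pre_
  | some c =>
    let fd := PySem.Chars.isdigit c
    String.ofList (PySem.List.sorted s.toList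
      (fun ch => if PySem.Chars.isdigit ch == fd then (1 : Nat) else 0) false)

-- ===== PRECONDITION & SPEC =====
-- Pre_ excludes only the empty string, on which A (and B) raise IndexError at s[0].
def Pre_reverse_str (s : String) : Prop := s ≠ ""
instance (s : String) : Decidable (Pre_reverse_str s) := by unfold Pre_reverse_str; infer_instance
def pvWitness_reverse_str : String := "a1b2"

def Spec_reverse_str (s : String) (out : String) : Prop := out = reverse_str_alt s
instance (s : String) (out : String) : Decidable (Spec_reverse_str s out) := by unfold Spec_reverse_str; infer_instance

-- ===== CLAIM (what is proved, stated in full; the proofs are below) =====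
def Claim_equal_reverse_str : Prop := ∀ (s : String), Dom_reverse_str s → Pre_reverse_str s → Spec_reverse_str s (reverse_str s)

-- ===== LEMMAS AND PROOFS =====

-- inserting a 0-key element into a 0-keys-then-1-keys list lands at the boundary
theorem insertBy_binary_zero {α : Type} (k : α → Nat) (x : α) (A B : List α)
    (hA : ∀ a ∈ A, k a = 0) (hx : k x = 0) (hB : ∀ b ∈ B, k b = 1) :
    PySem.List.insertBy (fun a b => decide (k a < k b)) x (A ++ B) = A ++ x :: B := by
  induction A with
  | nil =>
    cases B with
    | nil => simp [PySem.List.insertBy]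
    | cons b bs =>
      have hb := hB b (by simp)
      simp [PySem.List.insertBy, hx, hb]
  | cons a as ih =>
    have ha := hA a (by simp)
    simp only [List.cons_append, PySem.List.insertBy, hx, ha]
    simp [ih (fun a ha' => hA a (by simp [ha']))]

-- inserting a 1-key element when every key is ≤ 1 appends it at the end
theorem insertBy_binary_one {α : Type} (k : α → Nat) (x : α) (ys : List α)
    (hys : ∀ y ∈ ys, k y ≤ 1) (hx : k x = 1) :
    PySem.List.insertBy (fun a b => decide (k a < k b)) x ys = ys ++ [x] := by
  apply PySem.List.insertBy_of_forall_not_before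
  intro y hy
  have := hys y hy
  simp [hx]; omega

-- stable sort of a 0/1-keyed list = the 0-key elements (in order) then the 1-key elements (in order)
theorem sorted_binary {α : Type} (k : α → Nat) (xs : List α) (hk : ∀ x, k x ≤ 1) :
    PySem.List.sorted xs k false
      = xs.filter (fun x => k x == 0) ++ xs.filter (fun x => k x == 1) := by
  rw [PySem.List.sorted_eq_foldl_insertBy]
  suffices h : ∀ (ys : List α) (A B : List α), (∀ a ∈ A, k a = 0) → (∀ b ∈ B, k b = 1) →
      ys.foldl (fun acc x => PySem.List.insertBy (fun a b => decide (k a < k b)) x acc) (A ++ B)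
        = (A ++ ys.filter (fun x => k x == 0)) ++ (B ++ ys.filter (fun x => k x == 1)) by
    simpa using h xs [] [] (by simp) (by simp)
  intro ys
  induction ys with
  | nil => intro A B hA hB; simp
  | cons y t ih =>
    intro A B hA hB
    have hy := hk y
    by_cases h0 : k y = 0
    · have hA' : ∀ a ∈ A ++ [y], k a = 0 := by
        intro a ha
        rcases List.mem_append.mp ha with h | h
        · exact hA a h
        · simp at h; simpa [h] using h0
      rw [List.foldl_cons, insertBy_binary_zero k y A B hA h0 hB,
          show A ++ y :: B = (A ++ [y]) ++ B by simp,
          ih (A ++ [y]) B hA' hB]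
      simp [h0]
    · have h1 : k y = 1 := by omega
      have hAB : ∀ z ∈ A ++ B, k z ≤ 1 := by
        intro z hz
        rcases List.mem_append.mp hz with h | h
        · simp [hA z h]
        · simp [hB z h]
      have hB' : ∀ b ∈ B ++ [y], k b = 1 := by
        intro b hb
        rcases List.mem_append.mp hb with h | h
        · exact hB b h
        · simp at h; simpa [h] using h1
      rw [List.foldl_cons, insertBy_binary_one k y (A ++ B) hAB h1,
          List.append_assoc, ih A (B ++ [y]) hA hB']
      simp [h1]

-- A's partition loop computes the two filters
theorem partition_loop_eq (l : List Char) :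
    l.foldl (fun (p : List Char × List Char) i =>
        if PySem.Chars.isdigit i then (p.1, p.2 ++ [i]) else (p.1 ++ [i], p.2)) ([], [])
      = (l.filter (fun i => !PySem.Chars.isdigit i), l.filter (fun i => PySem.Chars.isdigit i)) := by
  have h : (fun (p : List Char × List Char) i =>
        if PySem.Chars.isdigit i then (p.1, p.2 ++ [i]) else (p.1 ++ [i], p.2))
      = (fun (p : List Char × List Char) i =>
        ((fun s1 i => if !PySem.Chars.isdigit i then s1 ++ [i] else s1) p.1 i,
         (fun s2 i => if PySem.Chars.isdigit i then s2 ++ [i] else s2) p.2 i)) := by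
    funext p i
    by_cases h : PySem.Chars.isdigit i <;> simp [h]
  rw [h, PySem.List.foldl_prod_mk
        (fun s1 i => if !PySem.Chars.isdigit i then s1 ++ [i] else s1)
        (fun s2 i => if PySem.Chars.isdigit i then s2 ++ [i] else s2),
      PySem.List.foldl_append_if_eq_filter, PySem.List.foldl_append_if_eq_filter]
  simp

-- ===== VERDICT (by name: the statement is the Claim_ definition above) =====
theorem reverse_str_spec : Claim_equal_reverse_str := by
  intro s _ _
  unfold Spec_reverse_str reverse_str reverse_str_alt
  cases hget : PySem.List.pyGet? s.toList 0 with
  | none => simp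
  | some c =>
    simp only [partition_loop_eq]
    cases hc : PySem.Chars.isdigit c with
    | true =>
      rw [sorted_binary (fun ch => if PySem.Chars.isdigit ch == true then (1 : Nat) else 0)
            s.toList (by intro x; dsimp; split <;> omega), if_pos rfl]
      congr 2 <;>
        · apply List.filter_congr
          intro x _
          by_cases h : PySem.Chars.isdigit x <;> simp [h]
    | false =>
      rw [sorted_binary (fun ch => if PySem.Chars.isdigit ch == false then (1 : Nat) else 0)
            s.toList (by intro x; dsimp; split <;> omega),
          if_neg (by simp)]
      congr 2 <;>
        · apply List.filter_congr
          intro x _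
          by_cases h : PySem.Chars.isdigit x <;> simp [h]
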